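-- pv_equiv track=rewrite | github.com/ejlb/jigsaw-cnn | jigsaw/patches.py | grid_coord_iter
-- ===== SOURCE A (Python) =====
-- def grid_coord_iter(grid_length, grid_square_length):
--     """ Generates coordinates of grid squares.
--
--         param: grid_length - how many squares the grid contains in one column.
--         param: grid_square_length - size of each grid square
--     """
--
--     for column in range(grid_length):
--         for row in range(grid_length):
--             m_start = row * grid_square_length
--             m_stop = (row + 1) * grid_square_length
--             n_start = column * grid_square_length
--             n_stop = (column + 1) * grid_square_length
--
--             yield m_start, m_stop, n_start, n_stop
-- ===== SOURCE B (Python) =====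
-- def grid_coord_iter(grid_length, grid_square_length):
--     """Precompute the grid-line boundary table once by running addition (no per-cell
--     multiplication), pair adjacent boundaries with zip into intervals, then emit the
--     cartesian pairing of intervals (column interval outer, row interval inner)."""
--     edges = [0]
--     e = 0
--     for _ in range(grid_length):
--         e += grid_square_length
--         edges.append(e)
--     intervals = list(zip(edges, edges[1:]))
--     for n_start, n_stop in intervals:
--         yield from ((m_start, m_stop, n_start, n_stop)
--                     for m_start, m_stop in intervals)
-- ===== Notes on version B (the rewrite author's own statement) =====
-- stated objective: alternative
-- what changed: B precomputes the grid-line boundary table once by running addition, pairs adjacent boundaries with zip into a list of intervals, and emits the cartesian pairing of that interval table, replacing A's per-cell bound arithmetic inside nested index loops.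
import Mathlib
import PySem

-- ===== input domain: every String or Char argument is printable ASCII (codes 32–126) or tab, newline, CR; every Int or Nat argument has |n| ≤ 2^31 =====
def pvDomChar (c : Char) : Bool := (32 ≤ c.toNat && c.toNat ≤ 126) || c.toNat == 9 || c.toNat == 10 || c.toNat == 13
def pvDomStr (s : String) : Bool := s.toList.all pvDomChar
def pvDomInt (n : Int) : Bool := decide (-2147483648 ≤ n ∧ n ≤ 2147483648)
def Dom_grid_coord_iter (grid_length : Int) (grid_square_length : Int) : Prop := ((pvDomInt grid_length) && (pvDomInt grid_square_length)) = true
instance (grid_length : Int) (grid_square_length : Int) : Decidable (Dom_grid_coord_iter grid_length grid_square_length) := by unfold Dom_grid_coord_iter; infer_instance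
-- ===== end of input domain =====

-- B precomputes the boundary table once by running addition, zips adjacent boundaries into
-- intervals, and emits the cartesian pairing of that table; objective: alternative, same cost.

-- ===== PORT A =====
def grid_coord_iter (grid_length : Int) (grid_square_length : Int) : List (Int × Int × Int × Int) :=
  (PySem.List.pyRange 0 grid_length 1).foldl (fun out column =>
    (PySem.List.pyRange 0 grid_length 1).foldl (fun out row =>
      out ++ [(row * grid_square_length, (row + 1) * grid_square_length,
               column * grid_square_length, (column + 1) * grid_square_length)]) out) []

-- ===== PORT B =====
def grid_coord_iter_alt (grid_length : Int) (grid_square_length : Int) : List (Int × Int × Int × Int) :=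
  -- edges/e accumulated over range(grid_length); the loop variable is ignored, as in Source B
  let p := (PySem.List.pyRange 0 grid_length 1).foldl
    (fun st _ => (st.1 ++ [st.2 + grid_square_length], st.2 + grid_square_length))
    (([(0 : Int)] : List Int), (0 : Int))
  let edges := p.1
  let intervals := edges.zip (PySem.List.slice edges (some 1) none)
  intervals.foldl (fun out ns =>
    out ++ intervals.map (fun ms => (ms.1, ms.2, ns.1, ns.2))) []

-- ===== PRECONDITION & SPEC =====
def Spec_grid_coord_iter (grid_length : Int) (grid_square_length : Int) (out : List (Int × Int × Int × Int)) : Prop := out = grid_coord_iter_alt grid_length grid_square_length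
instance (grid_length : Int) (grid_square_length : Int) (out : List (Int × Int × Int × Int)) : Decidable (Spec_grid_coord_iter grid_length grid_square_length out) := by unfold Spec_grid_coord_iter; infer_instance

-- ===== CLAIM =====
def Claim_equal_grid_coord_iter : Prop := ∀ (grid_length : Int) (grid_square_length : Int), Dom_grid_coord_iter grid_length grid_square_length → Spec_grid_coord_iter grid_length grid_square_length (grid_coord_iter grid_length grid_square_length)

-- ===== LEMMAS AND PROOFS =====

-- the edges/e loop ignores its element: its result depends only on the list length
theorem pv_edges_fold (s : Int) : ∀ (l : List Int) (es : List Int) (e : Int),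
    l.foldl (fun st (_ : Int) => (st.1 ++ [st.2 + s], st.2 + s)) (es, e)
      = (es ++ (List.range l.length).map (fun k : Nat => e + ((k : Int) + 1) * s), e + l.length * s) := by
  intro l
  induction l with
  | nil =>
      intro es e
      simp only [List.foldl_nil, List.length_nil, List.range_zero, List.map_nil,
        List.append_nil, Nat.cast_zero, zero_mul, add_zero]
  | cons x xs ih =>
      intro es e
      rw [List.foldl_cons, ih, List.length_cons, List.range_succ_eq_map,
        List.map_cons, List.map_map, Prod.mk.injEq]
      refine ⟨?_, by push_cast; ring⟩
      rw [List.append_assoc, List.singleton_append]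
      congr 1
      rw [List.cons.injEq]
      exact ⟨by ring, List.map_congr_left fun k _ => by
        simp only [Function.comp_apply, Nat.succ_eq_add_one]; push_cast; ring⟩

-- edges is the boundary table k ↦ k*s
theorem pv_edges (g s : Int) :
    ((PySem.List.pyRange 0 g 1).foldl
      (fun st (_ : Int) => (st.1 ++ [st.2 + s], st.2 + s)) (([(0:Int)] : List Int), (0:Int))).1
      = (List.range ((g - 0).toNat + 1)).map (fun k : Nat => (k : Int) * s) := by
  rw [pv_edges_fold, PySem.List.length_pyRange_one]
  rw [List.range_succ_eq_map, List.map_cons, List.map_map, List.singleton_append]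
  rw [List.cons.injEq]
  exact ⟨by ring, List.map_congr_left fun k _ => by
    simp only [Function.comp_apply, Nat.succ_eq_add_one]; push_cast; ring⟩

-- zipping the boundary table with its tail gives the interval table k ↦ (k*s, (k+1)*s)
theorem pv_intervals (n : Nat) (s : Int) :
    ((List.range (n + 1)).map (fun k : Nat => (k : Int) * s)).zip
      (((List.range (n + 1)).map (fun k : Nat => (k : Int) * s)).tail)
      = (List.range n).map (fun k : Nat => ((k : Int) * s, ((k : Int) + 1) * s)) := by
  apply List.ext_getElem
  · simp only [List.length_zip, List.length_tail, List.length_map, List.length_range]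
    omega
  · intro i h1 h2
    have hi : i < n := by
      simpa only [List.length_map, List.length_range] using h2
    have hi1 : i + 1 < n + 1 := by omega
    simp only [List.getElem_zip, List.getElem_tail, List.getElem_map,
      List.getElem_range, Prod.mk.injEq]
    exact ⟨trivial, by push_cast; ring⟩

-- A's nested foldl is the cartesian flatMap over the two index ranges
theorem pv_A_flat (g s : Int) : grid_coord_iter g s
    = (PySem.List.pyRange 0 g 1).flatMap (fun column =>
        (PySem.List.pyRange 0 g 1).map (fun row =>
          (row * s, (row + 1) * s, column * s, (column + 1) * s))) := by
  unfold grid_coord_iter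
  have hfun : (fun (out : List (Int × Int × Int × Int)) (column : Int) =>
      (PySem.List.pyRange 0 g 1).foldl (fun out row =>
        out ++ [(row * s, (row + 1) * s, column * s, (column + 1) * s)]) out)
      = fun out column => out ++ (PySem.List.pyRange 0 g 1).map (fun row =>
          (row * s, (row + 1) * s, column * s, (column + 1) * s)) := by
    funext out column
    exact PySem.List.foldl_append_singleton_eq_map ..
  rw [hfun, PySem.List.foldl_append_eq_flatMap, List.nil_append]

theorem pv_main (g s : Int) : grid_coord_iter g s = grid_coord_iter_alt g s := by
  unfold grid_coord_iter_alt
  simp only [PySem.List.slice_from_one]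
  rw [pv_edges g s, pv_intervals ((g - 0).toNat) s,
    PySem.List.foldl_append_eq_flatMap, List.nil_append, List.flatMap_map,
    pv_A_flat, PySem.List.pyRange_one, List.flatMap_map]
  refine List.flatMap_congr ?_
  intro c _
  rw [List.map_map, List.map_map]
  refine List.map_congr_left ?_
  intro r _
  simp only [Function.comp_apply, zero_add]

-- ===== VERDICT =====
theorem grid_coord_iter_spec : Claim_equal_grid_coord_iter := by
  intro g s _
  unfold Spec_grid_coord_iter
  exact pv_main g s
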